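-- pv_equiv track=rewrite | github.com/nutcracker04/commute | src/entry.py | _d1_nullsafe
-- ===== SOURCE A (Python) =====
-- from typing import Any
--
-- def _d1_nullsafe(sql: str, args: tuple[Any, ...]) -> tuple[str, tuple[Any, ...]]:
--     """Replace ? placeholders with NULL literal for any None values.
--
--     D1's Python binding cannot accept None/null bind parameters, so we inline
--     NULL directly into the SQL and remove those positions from the bind list.
--     """
--     parts = sql.split("?")
--     if len(parts) - 1 != len(args):
--         return sql, args
--     new_args: list[Any] = []
--     out: list[str] = [parts[0]]
--     for i, arg in enumerate(args):
--         if arg is None: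
--             out.append("NULL")
--         else:
--             out.append("?")
--             new_args.append(arg)
--         out.append(parts[i + 1])
--     return "".join(out), tuple(new_args)
-- ===== SOURCE B (Python) =====
-- def _d1_nullsafe(sql: str, args):
--     """Single left-to-right character scan with a placeholder index, instead of
--     split('?') and rebuilding from a parts array."""
--     if sql.count("?") != len(args):
--         return sql, args
--     out = []
--     new_args = []
--     j = 0
--     for ch in sql:
--         if ch == "?":
--             a = args[j]
--             j += 1
--             if a is None:
--                 out.append("NULL")
--             else:
--                 out.append("?")
--                 new_args.append(a)
--         else:
--             out.append(ch)
--     return "".join(out), tuple(new_args)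
-- ===== Notes on version B (the rewrite author's own statement) =====
-- stated objective: alternative
-- what changed: B drops the split('?')/parts-array rebuild and instead guards with sql.count('?') and makes one character scan over sql, advancing a placeholder index into args at each '?' to emit NULL or keep the placeholder.
import Mathlib
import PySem

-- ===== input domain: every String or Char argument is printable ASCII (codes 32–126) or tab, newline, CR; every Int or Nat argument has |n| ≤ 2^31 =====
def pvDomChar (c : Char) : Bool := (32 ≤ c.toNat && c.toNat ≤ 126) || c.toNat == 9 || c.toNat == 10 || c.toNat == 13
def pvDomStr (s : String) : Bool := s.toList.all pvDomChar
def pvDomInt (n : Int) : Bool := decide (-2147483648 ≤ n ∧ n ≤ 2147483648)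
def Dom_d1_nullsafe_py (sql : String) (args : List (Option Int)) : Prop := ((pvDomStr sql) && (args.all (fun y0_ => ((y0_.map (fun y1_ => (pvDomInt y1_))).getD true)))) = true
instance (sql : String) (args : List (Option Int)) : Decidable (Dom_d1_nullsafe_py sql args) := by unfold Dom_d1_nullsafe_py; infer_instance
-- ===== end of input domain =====

-- B replaces A's split-on-'?'-and-rebuild with a count guard plus one character scan
-- carrying a placeholder cursor into args (objective: alternative; same cost).


-- ===== PORT A =====
-- sql.split("?"): the separator is the nonempty literal "?", so split? is always `some`
-- and the .getD [] default is never used; parts[0] always exists and parts[i+1] is always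
-- in range under the length guard, so the .getD "" defaults are never used either.
def d1_nullsafe_py (sql : String) (args : List (Option Int)) : String × List (Option Int) :=
  let parts := (PySem.Str.split? sql "?").getD []
  if (parts.length : Int) - 1 ≠ (args.length : Int) then (sql, args)
  else
    let st := (PySem.List.enumerate args).foldl
      (fun (acc : List String × List (Option Int)) p =>
        match p.2 with
        | none   => (acc.1 ++ ["NULL"] ++ [(PySem.List.pyGet? parts (p.1 + 1)).getD ""], acc.2)
        | some v => (acc.1 ++ ["?"] ++ [(PySem.List.pyGet? parts (p.1 + 1)).getD ""], acc.2 ++ [some v]))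
      ([(PySem.List.pyGet? parts 0).getD ""], ([] : List (Option Int)))
    (PySem.Str.join "" st.1, st.2)

-- ===== PORT B =====
-- B's scan: walk the characters once; at '?' consult the next pending bind argument
-- (args[j] with the cursor j advancing = consuming the head of the remaining args list).
def d1_scan : List Char → List (Option Int) → List Char × List (Option Int)
  | [], _ => ([], [])
  | c :: cs, args =>
    if c = '?' then
      match args with
      | none :: rest   => let r := d1_scan cs rest; ('N' :: 'U' :: 'L' :: 'L' :: r.1, r.2)
      | some v :: rest => let r := d1_scan cs rest; ('?' :: r.1, some v :: r.2)
      | []             => let r := d1_scan cs []; ('?' :: r.1, r.2)  -- unreachable under the count guard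
    else
      let r := d1_scan cs args; (c :: r.1, r.2)

def d1_nullsafe_py_alt (sql : String) (args : List (Option Int)) : String × List (Option Int) :=
  if PySem.Str.count sql "?" ≠ args.length then (sql, args)
  else
    let r := d1_scan sql.toList args
    (String.ofList r.1, r.2)

-- ===== PRECONDITION & SPEC =====
def Spec_d1_nullsafe_py (sql : String) (args : List (Option Int)) (out : String × List (Option Int)) : Prop := out = d1_nullsafe_py_alt sql args
instance (sql : String) (args : List (Option Int)) (out : String × List (Option Int)) : Decidable (Spec_d1_nullsafe_py sql args out) := by unfold Spec_d1_nullsafe_py; infer_instance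

-- ===== CLAIM (what is proved, stated in full; the proofs are below) =====
def Claim_equal_d1_nullsafe_py : Prop := ∀ (sql : String) (args : List (Option Int)), Dom_d1_nullsafe_py sql args → Spec_d1_nullsafe_py sql args (d1_nullsafe_py sql args)

-- ===== LEMMAS AND PROOFS =====

-- pvSp cs = what Python's cs.split('?') produces, as a simple structural recursion.
def pvSp : List Char → List (List Char)
  | [] => [[]]
  | c :: t =>
    if c = '?' then [] :: pvSp t
    else match pvSp t with
         | [] => [[c]]
         | p :: ps => (c :: p) :: ps

def pvPre (x : List Char) : List (List Char) → List (List Char)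
  | [] => [x]
  | p :: ps => (x ++ p) :: ps

lemma pvSp_ne_nil (cs : List Char) : pvSp cs ≠ [] := by
  induction cs with
  | nil => simp [pvSp]
  | cons c t ih =>
    simp only [pvSp]
    split_ifs
    · simp
    · cases pvSp t <;> simp

lemma pvSp_length (cs : List Char) : (pvSp cs).length = cs.count '?' + 1 := by
  induction cs with
  | nil => rfl
  | cons c t ih =>
    by_cases h : c = '?'
    · subst h; simp [pvSp, List.count_cons, ih]
    · simp only [pvSp, if_neg h]
      cases hsp : pvSp t with
      | nil => exact absurd hsp (pvSp_ne_nil t)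
      | cons p ps =>
        rw [hsp] at ih
        simp only [List.count_cons, List.length_cons] at *
        simp [h, ih]

lemma pvGoSplit (fuel : Nat) : ∀ (l cur : List Char) (acc : List (List Char)),
    l.length < fuel →
    PySem.Chars.splitOn.go ['?'] fuel l cur acc = acc.reverse ++ pvPre cur.reverse (pvSp l) := by
  induction fuel with
  | zero => intro l cur acc h; omega
  | succ n ih =>
    intro l cur acc h
    cases l with
    | nil =>
      show (cur.reverse :: acc).reverse = _
      simp [pvSp, pvPre]
    | cons c rest =>
      show (if (['?'] : List Char).isPrefixOf (c :: rest) then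
              PySem.Chars.splitOn.go ['?'] n (List.drop (['?'] : List Char).length (c :: rest)) [] (cur.reverse :: acc)
            else PySem.Chars.splitOn.go ['?'] n rest (c :: cur) acc) = _
      by_cases hc : c = '?'
      · subst hc
        have hpre : (['?'] : List Char).isPrefixOf ('?' :: rest) = true := by
          simp [List.isPrefixOf]
        rw [if_pos hpre]
        have hlen : rest.length < n := by simp at h; omega
        rw [ih _ _ _ (by simpa using hlen)]
        cases hsp : pvSp rest with
        | nil => exact absurd hsp (pvSp_ne_nil rest)
        | cons p ps => simp [pvSp, pvPre, hsp]
      · have hpre : (['?'] : List Char).isPrefixOf (c :: rest) = false := by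
          simp [List.isPrefixOf]
          intro hq; exact absurd hq.symm hc
        rw [if_neg (by simp [hpre])]
        have hlen : rest.length < n := by simp at h; omega
        rw [ih _ _ _ hlen]
        cases hsp : pvSp rest with
        | nil => exact absurd hsp (pvSp_ne_nil rest)
        | cons p ps => simp [pvSp, pvPre, hsp, hc]

lemma pvSplitOn_eq (cs : List Char) : PySem.Chars.splitOn cs ['?'] = pvSp cs := by
  show PySem.Chars.splitOn.go ['?'] (cs.length + 1) cs [] [] = pvSp cs
  rw [pvGoSplit (cs.length + 1) cs [] [] (by omega)]
  cases hsp : pvSp cs with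
  | nil => exact absurd hsp (pvSp_ne_nil cs)
  | cons p ps => simp [pvPre]

-- count.go consumes at least one character per fuel unit, so fuel = length suffices.
lemma pvGoCount (fuel : Nat) : ∀ (l : List Char) (acc : Nat),
    l.length ≤ fuel →
    PySem.Chars.count.go ['?'] fuel l acc = acc + l.count '?' := by
  induction fuel with
  | zero =>
    intro l acc h
    have : l = [] := by
      cases l with
      | nil => rfl
      | cons c t => simp at h
    subst this
    rfl
  | succ n ih =>
    intro l acc h
    cases l with
    | nil => show acc = acc + _; simp
    | cons c rest =>
      show (if (['?'] : List Char).isPrefixOf (c :: rest) then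
              PySem.Chars.count.go ['?'] n (List.drop (['?'] : List Char).length (c :: rest)) (acc + 1)
            else PySem.Chars.count.go ['?'] n rest acc) = _
      have hlen : rest.length ≤ n := by simp at h; omega
      by_cases hc : c = '?'
      · subst hc
        rw [if_pos (by simp [List.isPrefixOf])]
        rw [ih _ _ (by simpa using hlen)]
        simp [List.count_cons]
        omega
      · rw [if_neg (by simp [List.isPrefixOf]; intro hq; exact absurd hq.symm hc)]
        rw [ih _ _ hlen]
        simp [List.count_cons, hc]

lemma pvCount_eq (cs : List Char) : PySem.Chars.count cs ['?'] = cs.count '?' := by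
  show (if (['?'] : List Char).isEmpty then cs.length + 1 else PySem.Chars.count.go ['?'] cs.length cs 0) = _
  rw [if_neg (by simp)]
  simpa using pvGoCount cs.length cs 0 (le_refl _)

-- the chunks of A's output beyond the first part: one token and one part per argument.
def pvChunksC : List (Option Int) → List (List Char) → List (List Char)
  | [], _ => []
  | _ :: _, [] => []
  | none :: as, p :: pt => ['N','U','L','L'] :: p :: pvChunksC as pt
  | some _ :: as, p :: pt => ['?'] :: p :: pvChunksC as pt

def pvChunks : List (Option Int) → List String → List String
  | [], _ => []
  | _ :: _, [] => []
  | none :: as, p :: pt => "NULL" :: p :: pvChunks as pt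
  | some _ :: as, p :: pt => "?" :: p :: pvChunks as pt

lemma pvChunks_toList : ∀ (args : List (Option Int)) (ps : List String),
    (pvChunks args ps).map String.toList = pvChunksC args (ps.map String.toList) := by
  intro args
  induction args with
  | nil => intro ps; cases ps <;> rfl
  | cons a t ih =>
    intro ps
    cases ps with
    | nil => cases a <;> rfl
    | cons p pt => cases a <;> simp [pvChunks, pvChunksC, ih]

lemma pvJoinNil : ∀ l : List (List Char), PySem.Chars.join [] l = l.flatten := by
  intro l
  induction l with
  | nil => rfl
  | cons a t ih =>
    cases t with
    | nil => simp [PySem.Chars.join_singleton]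
    | cons b t2 =>
      rw [PySem.Chars.join_cons_cons, ih]
      simp

-- A's fold over `enumerate args`, characterised against pvChunks.
lemma pvFoldA (p0 : String) (ps : List String) :
    ∀ (args : List (Option Int)) (k : Nat) (outAcc : List String) (naAcc : List (Option Int)),
    k + args.length = ps.length →
    (PySem.List.enumerate args ((k : Nat) : Int)).foldl
      (fun (acc : List String × List (Option Int)) p =>
        match p.2 with
        | none   => (acc.1 ++ ["NULL"] ++ [(PySem.List.pyGet? (p0 :: ps) (p.1 + 1)).getD ""], acc.2)
        | some v => (acc.1 ++ ["?"] ++ [(PySem.List.pyGet? (p0 :: ps) (p.1 + 1)).getD ""], acc.2 ++ [some v]))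
      (outAcc, naAcc)
    = (outAcc ++ pvChunks args (ps.drop k), naAcc ++ args.filter Option.isSome) := by
  intro args
  induction args with
  | nil =>
    intro k outAcc naAcc h
    simp only [List.length_nil] at h
    have hd : ps.drop k = [] := List.drop_eq_nil_of_le (by omega)
    simp [hd, pvChunks]
  | cons a t ih =>
    intro k outAcc naAcc h
    simp only [List.length_cons] at h
    have hk : k < ps.length := by omega
    have henum : PySem.List.enumerate (a :: t) ((k : Nat) : Int)
        = (((k : Nat) : Int), a) :: PySem.List.enumerate t (((k : Nat) : Int) + 1) := rfl
    have hcast : ((k : Nat) : Int) + 1 = (((k + 1 : Nat)) : Int) := by push_cast; ring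
    have hget : (PySem.List.pyGet? (p0 :: ps) (((k : Nat) : Int) + 1)).getD "" = ps[k] := by
      rw [hcast, PySem.List.pyGet?_natCast]
      simp [List.getElem?_cons_succ, List.getElem?_eq_getElem hk]
    have hdrop : ps.drop k = ps[k] :: ps.drop (k + 1) := (List.getElem_cons_drop hk).symm
    rw [henum, List.foldl_cons]
    cases a with
    | none =>
      show (PySem.List.enumerate t (((k : Nat) : Int) + 1)).foldl _
          (outAcc ++ ["NULL"] ++ [(PySem.List.pyGet? (p0 :: ps) (((k : Nat) : Int) + 1)).getD ""], naAcc) = _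
      rw [hget, hcast, ih (k + 1) _ _ (by omega)]
      rw [hdrop]
      simp [pvChunks, List.filter]
    | some v =>
      show (PySem.List.enumerate t (((k : Nat) : Int) + 1)).foldl _
          (outAcc ++ ["?"] ++ [(PySem.List.pyGet? (p0 :: ps) (((k : Nat) : Int) + 1)).getD ""], naAcc ++ [some v]) = _
      rw [hget, hcast, ih (k + 1) _ _ (by omega)]
      rw [hdrop]
      simp [pvChunks, List.filter]

-- B's scan, characterised against pvSp and pvChunksC.
lemma pvScan : ∀ (cs : List Char) (args : List (Option Int)) (p0 : List Char) (ps : List (List Char)),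
    pvSp cs = p0 :: ps → ps.length = args.length →
    d1_scan cs args = (p0 ++ (pvChunksC args ps).flatten, args.filter Option.isSome) := by
  intro cs
  induction cs with
  | nil =>
    intro args p0 ps hsp hlen
    simp [pvSp] at hsp
    obtain ⟨h1, h2⟩ := hsp
    subst h1; subst h2
    simp at hlen
    cases args with
    | nil => rfl
    | cons a t => simp at hlen
  | cons c t ih =>
    intro args p0 ps hsp hlen
    by_cases hc : c = '?'
    · subst hc
      simp only [pvSp, if_pos rfl] at hsp
      injection hsp with h1 h2
      subst h1
      cases hq : pvSp t with
      | nil => exact absurd hq (pvSp_ne_nil t)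
      | cons q0 qs =>
        rw [hq] at h2
        subst h2
        simp only [List.length_cons] at hlen
        cases args with
        | nil => simp at hlen
        | cons a as =>
          have has : qs.length = as.length := by simpa using hlen
          cases a with
          | none =>
            show ('N' :: 'U' :: 'L' :: 'L' :: (d1_scan t as).1, (d1_scan t as).2) = _
            rw [ih as q0 qs hq has]
            simp [pvChunksC, List.filter]
          | some v =>
            show ('?' :: (d1_scan t as).1, some v :: (d1_scan t as).2) = _
            rw [ih as q0 qs hq has]
            simp [pvChunksC, List.filter]
    · simp only [pvSp, if_neg hc] at hsp
      cases hq : pvSp t with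
      | nil => exact absurd hq (pvSp_ne_nil t)
      | cons q0 qs =>
        rw [hq] at hsp
        injection hsp with h1 h2
        subst h1; subst h2
        simp only [d1_scan, if_neg hc]
        rw [ih args q0 qs hq (by simpa using hlen)]
        simp

-- ===== VERDICT (by name: the statement is the Claim_ definition above) =====
theorem d1_nullsafe_py_spec : Claim_equal_d1_nullsafe_py := by
  intro sql args _
  unfold Spec_d1_nullsafe_py
  have hsplit := PySem.Str.split?_map sql "?"
  cases hsp : PySem.Str.split? sql "?" with
  | none =>
    rw [hsp] at hsplit
    simp [PySem.Chars.split?] at hsplit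
  | some L =>
    rw [hsp] at hsplit
    have hL : L.map String.toList = pvSp sql.toList := by
      have h2 : PySem.Chars.split? sql.toList ("?".toList) = some (pvSp sql.toList) := by
        show PySem.Chars.split? sql.toList ['?'] = _
        simp [PySem.Chars.split?, pvSplitOn_eq]
      rw [h2] at hsplit
      simpa using hsplit
    have hlenL : L.length = sql.toList.count '?' + 1 := by
      have h3 := congrArg List.length hL
      simpa [pvSp_length] using h3
    have hcount : PySem.Str.count sql "?" = sql.toList.count '?' := by
      rw [PySem.Str.count_eq]
      exact pvCount_eq _
    simp only [d1_nullsafe_py, d1_nullsafe_py_alt]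
    rw [hsp]
    simp only [Option.getD_some]
    by_cases hg : sql.toList.count '?' = args.length
    · rw [if_neg (by rw [hlenL]; push_cast; omega), if_neg (by rw [hcount]; omega)]
      cases L with
      | nil => simp at hlenL
      | cons s0 S =>
        have hS : pvSp sql.toList = s0.toList :: S.map String.toList := by
          simpa using hL.symm
        have hSlen : S.length = args.length := by
          simp only [List.length_cons] at hlenL; omega
        have hget0 : (PySem.List.pyGet? (s0 :: S) (0 : Int)).getD "" = s0 := by
          rw [show (0 : Int) = ((0 : Nat) : Int) from rfl, PySem.List.pyGet?_natCast]
          rfl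
        rw [hget0]
        have hfold := pvFoldA s0 S args 0 [s0] [] (by omega)
        rw [show (((0 : Nat)) : Int) = (0 : Int) from rfl] at hfold
        rw [hfold]
        rw [pvScan sql.toList args s0.toList (S.map String.toList) hS (by simp [hSlen])]
        simp only [Prod.mk.injEq]
        constructor
        · apply String.toList_inj.mp
          rw [PySem.Str.toList_join, String.toList_ofList]
          simp [pvJoinNil, pvChunks_toList]
        · simp
    · rw [if_pos (by rw [hlenL]; push_cast; omega), if_pos (by rw [hcount]; omega)]
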